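-- pv_equiv track=rewrite | github.com/KhronosGroup/OpenXR-SDK-Source | src/scripts/interaction_profile_processor.py | _version_cleaner
-- ===== SOURCE A (Python) =====
-- from typing import Dict, FrozenSet, Iterable, List, Optional, Set, Tuple
--
-- def _version_cleaner(term: FrozenSet[str]) -> FrozenSet[str]:
--     versions = list(sorted((s for s in term if s.startswith("XR_VERSION_"))))
--     if not versions:
--         return term
--
--     mutable_term = set(term)
--     # Saying the default version is redundant if we have more interesting dependencies.
--     if len(versions) == 1 and versions[0] == _DEFAULT_VER and len(term) > 1:
--         mutable_term.discard(_DEFAULT_VER)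
--
--     # keep the last one
--     redundant_versions = versions[:-1]
--     if redundant_versions:
--         mutable_term.difference_update(redundant_versions)
--
--     return frozenset(mutable_term)
--
-- _DEFAULT_VER = 'XR_VERSION_1_0'
-- ===== SOURCE B (Python) =====
-- _DEFAULT_VER = 'XR_VERSION_1_0'
--
--
-- def _version_cleaner(term):
--     versions = {s for s in term if s.startswith("XR_VERSION_")}
--     if not versions:
--         return term
--     keep = max(versions)
--     drop_keep = len(versions) == 1 and keep == _DEFAULT_VER and len(term) > 1
--     return frozenset(s for s in term
--                      if not s.startswith("XR_VERSION_")
--                      or (s == keep and not drop_keep))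
-- ===== Notes on version B (the rewrite author's own statement) =====
-- stated objective: simpler
-- what changed: B replaces A's sort-then-slice of the version strings plus two in-place set mutations (discard, difference_update) by a single linear max-scan for the version to keep and one filtering pass over the term.
import Mathlib
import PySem

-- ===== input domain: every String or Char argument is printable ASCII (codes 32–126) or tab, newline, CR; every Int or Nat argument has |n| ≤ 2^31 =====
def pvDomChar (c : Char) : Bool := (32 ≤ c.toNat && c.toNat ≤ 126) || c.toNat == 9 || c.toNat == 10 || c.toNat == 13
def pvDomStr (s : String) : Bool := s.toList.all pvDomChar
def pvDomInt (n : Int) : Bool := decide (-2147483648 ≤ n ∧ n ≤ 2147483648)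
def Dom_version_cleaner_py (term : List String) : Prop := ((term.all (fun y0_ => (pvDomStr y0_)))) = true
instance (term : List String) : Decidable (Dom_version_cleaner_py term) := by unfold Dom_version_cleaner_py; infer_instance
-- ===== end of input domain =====

-- B replaces A's sort-then-slice plus in-place set mutations by a single max-scan and one filter pass (simpler); same results.

-- ===== PORT A =====
def version_cleaner_py (term : List String) : List String :=
  let versions := PySem.List.sorted (term.filter (fun s => PySem.Str.startswith s "XR_VERSION_")) (fun x => x) false
  if versions.isEmpty then term
  else
    let mt0 : PySem.Set String := PySem.Set.ofList term
    let mt1 := if versions.length = 1 ∧ versions.headD "" = "XR_VERSION_1_0" ∧ 1 < term.length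
               then PySem.Set.discard mt0 "XR_VERSION_1_0" else mt0
    let redundant := PySem.List.slice versions none (some (-1))
    if redundant.isEmpty then mt1 else PySem.Set.diff mt1 redundant

-- ===== PORT B =====
def version_cleaner_py_alt (term : List String) : List String :=
  let versions : PySem.Set String := PySem.Set.ofList (term.filter (fun s => PySem.Str.startswith s "XR_VERSION_"))
  if versions.isEmpty then term
  else
    let keep := (PySem.List.max? versions (fun x => x)).getD ""
    let dropKeep := versions.length == 1 && keep == "XR_VERSION_1_0" && decide (1 < term.length)
    term.filter (fun s => !PySem.Str.startswith s "XR_VERSION_" || (s == keep && !dropKeep))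

-- ===== PRECONDITION & SPEC =====
-- Pre_ requires term to have no duplicate elements: under the type convention the frozenset argument
-- is encoded as a list of DISTINCT elements, so this excludes no actual input of the Python function.
def Pre_version_cleaner_py (term : List String) : Prop := term.Nodup
instance (term : List String) : Decidable (Pre_version_cleaner_py term) := by unfold Pre_version_cleaner_py; infer_instance
def pvWitness_version_cleaner_py : List String := ["XR_VERSION_1_0", "abc"]

def Spec_version_cleaner_py (term : List String) (out : List String) : Prop := out = version_cleaner_py_alt term
instance (term : List String) (out : List String) : Decidable (Spec_version_cleaner_py term out) := by unfold Spec_version_cleaner_py; infer_instance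

-- ===== CLAIM (what is proved, stated in full; the proofs are below) =====
def Claim_equal_version_cleaner_py : Prop := ∀ (term : List String), Dom_version_cleaner_py term → Pre_version_cleaner_py term → Spec_version_cleaner_py term (version_cleaner_py term)

-- ===== LEMMAS AND PROOFS =====

theorem version_cleaner_py_agree (term : List String) (hnd : term.Nodup) :
    version_cleaner_py term = version_cleaner_py_alt term := by
  have hF : (term.filter (fun s => PySem.Str.startswith s "XR_VERSION_")).Nodup :=
    hnd.filter _
  unfold version_cleaner_py version_cleaner_py_alt
  rw [PySem.Set.ofList_eq_self_of_nodup _ hF, PySem.Set.ofList_eq_self_of_nodup _ hnd]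
  set F := term.filter (fun s => PySem.Str.startswith s "XR_VERSION_") with hFdef
  by_cases hFe : F = []
  · have hs : (PySem.List.sorted ([] : List String) fun x => x) = [] := rfl
    simp [hFe, hs]
  · -- nonempty versions
    have hperm : (PySem.List.sorted F (fun x => x) false).Perm F := PySem.List.sorted_perm F _ false
    set S := PySem.List.sorted F (fun x => x) false with hSdef
    have hSne : S ≠ [] := fun h => hFe ((PySem.List.sorted_eq_nil_iff F _ false).1 h)
    have hSnd : S.Nodup := hperm.nodup_iff.2 hF
    have hPle : S.Pairwise (fun a b => a ≤ b) := PySem.List.sorted_pairwise F (fun x => x)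
    have hPlt : S.Pairwise (fun a b => a < b) := by
      refine (hPle.and hSnd).imp ?_
      rintro a b ⟨h1, h2⟩; exact lt_of_le_of_ne h1 h2
    obtain ⟨m, hm⟩ : ∃ m, PySem.List.max? F (fun x => x) = some m := by
      cases hmx : PySem.List.max? F (fun x => x) with
      | none => exact absurd ((PySem.List.max?_eq_none_iff F _).1 hmx) hFe
      | some m => exact ⟨m, rfl⟩
    have hmF : m ∈ F := PySem.List.max?_mem hm
    have hmax : ∀ y ∈ F, y ≤ m := PySem.List.max?_isMax hm
    have hdec : S.dropLast ++ [S.getLast hSne] = S := List.dropLast_append_getLast hSne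
    have hlast : S.getLast hSne = m := by
      have h1 : S.getLast hSne ≤ m := hmax _ (hperm.mem_iff.1 (List.getLast_mem hSne))
      have h2 : m ∈ S := hperm.mem_iff.2 hmF
      rw [← hdec] at h2
      rcases List.mem_append.1 h2 with h3 | h3
      · have := (List.pairwise_append.1 (hdec ▸ hPlt)).2.2 m h3 (S.getLast hSne) (List.mem_singleton_self _)
        exact absurd h1 (not_le.mpr this)
      · exact (List.mem_singleton.1 h3).symm
    have hmem_dropLast : ∀ s, s ∈ S.dropLast ↔ s ∈ S ∧ s ≠ m := by
      intro s
      constructor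
      · intro hs
        refine ⟨List.mem_of_mem_dropLast hs, fun he => ?_⟩
        have := (List.pairwise_append.1 (hdec ▸ hPlt)).2.2 s hs (S.getLast hSne) (List.mem_singleton_self _)
        rw [hlast, he] at this; exact lt_irrefl m this
      · intro ⟨hs, hne⟩
        rw [← hdec] at hs
        rcases List.mem_append.1 hs with h3 | h3
        · exact h3
        · exact absurd (hlast ▸ List.mem_singleton.1 h3) hne
    have hmemS : ∀ s, s ∈ term → (s ∈ S ↔ PySem.Str.startswith s "XR_VERSION_" = true) := by
      intro s hs
      rw [hperm.mem_iff, hFdef, List.mem_filter]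
      exact ⟨fun h => h.2, fun h => ⟨hs, h⟩⟩
    have hSemp : S.isEmpty = false := by simp [hSne]
    have hFemp : F.isEmpty = false := by simp [hFe]
    have hlenFS : F.length = S.length := hperm.length_eq.symm
    simp only [PySem.List.slice_to_neg_one, hm, hSemp, hFemp, Bool.false_eq_true, if_false,
      Option.getD_some]
    by_cases h1 : S.length = 1
    · -- exactly one version string
      obtain ⟨a, ha⟩ := List.length_eq_one_iff.1 h1
      have hSm : S = [m] := by
        have hmS : m ∈ S := hperm.mem_iff.2 hmF
        rw [ha] at hmS ⊢
        exact congrArg (fun x => [x]) (List.mem_singleton.1 hmS).symm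
      have hFm : F = [m] := by
        have h : ([m] : List String).Perm F := hSm ▸ hperm
        exact List.perm_singleton.1 h.symm
      have hpm : PySem.Str.startswith m "XR_VERSION_" = true := by
        have h := hmF; rw [hFdef] at h; exact (List.mem_filter.1 h).2
      have hmem_term_iff : ∀ s ∈ term, (PySem.Str.startswith s "XR_VERSION_" = true ↔ s = m) := by
        intro s hs
        constructor
        · intro hp
          have h : s ∈ F := by rw [hFdef]; exact List.mem_filter.2 ⟨hs, hp⟩
          rw [hFm] at h; exact List.mem_singleton.1 h
        · intro h; exact h ▸ hpm
      rw [hSm, hFm]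
      rw [if_pos (show ([m] : List String).dropLast.isEmpty = true by simp)]
      by_cases h2 : m = "XR_VERSION_1_0" ∧ 1 < term.length
      · rw [if_pos ⟨rfl, h2.1, h2.2⟩]
        show List.filter _ term = List.filter _ term
        refine List.filter_congr ?_
        intro s hs
        have hiff := hmem_term_iff s hs
        cases hp : PySem.Str.startswith s "XR_VERSION_" with
        | true => simp [hiff.1 hp, h2.1, h2.2]
        | false =>
          have hthis : ¬ s = m := fun h => by rw [h, hpm] at hp; cases hp
          have hthis' : ¬ s = "XR_VERSION_1_0" := fun h => hthis (h.trans h2.1.symm)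
          simp [h2.1, h2.2, hthis']
      · rw [if_neg (fun h => h2 ⟨h.2.1, h.2.2⟩)]
        symm
        rw [List.filter_eq_self]
        intro s hs
        rcases Decidable.not_and_iff_not_or_not.1 h2 with h3 | h3
        · cases hp : PySem.Str.startswith s "XR_VERSION_" with
          | true => simp [hmem_term_iff s hs |>.1 hp, h3]
          | false => simp
        · cases hp : PySem.Str.startswith s "XR_VERSION_" with
          | true => simp [hmem_term_iff s hs |>.1 hp, h3]
          | false => simp
    · -- at least two version strings
      have hpos : S ≠ [] := hSne
      have hgt : 1 < S.length := by
        have h0 : S.length ≠ 0 := fun h => hSne (List.length_eq_zero_iff.1 h)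
        omega
      have hdlne : S.dropLast.isEmpty = false := by
        rw [List.isEmpty_eq_false_iff]
        intro h
        have hlen := congrArg List.length h
        simp at hlen
        omega
      simp only [hdlne, Bool.false_eq_true, if_false]
      rw [if_neg (fun h => h1 h.1)]
      show List.filter _ term = List.filter _ term
      refine List.filter_congr ?_
      intro s hs
      have h3 := hmem_dropLast s
      have h4 := hmemS s hs
      have hlen1 : (F.length == 1) = false := by
        rw [hlenFS]; simp; omega
      cases hp : PySem.Str.startswith s "XR_VERSION_" with
      | false =>
        have hnin : s ∉ S.dropLast := fun hmem => by
          rw [h4.1 (List.mem_of_mem_dropLast hmem)] at hp; cases hp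
        simp [hnin]
      | true =>
        by_cases hsm : s = m
        · have hnin : s ∉ S.dropLast := fun hmem => (h3.1 hmem).2 hsm
          simp [hsm, hlen1]
          exact hsm ▸ hnin
        · have hin : s ∈ S.dropLast := h3.2 ⟨h4.2 hp, hsm⟩
          simp [hsm, hin, hlen1]


-- ===== VERDICT (by name: the statement is the Claim_ definition above) =====
theorem version_cleaner_py_spec : Claim_equal_version_cleaner_py := by
  intro term _ hpre
  exact version_cleaner_py_agree term hpre
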